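-- pv_equiv track=rewrite | github.com/Hemant-Jain-Author/Problem-Solving-in-Data-Structures-Algorithms-using-Python | IntroductoryChapters/Analysis.py | fun11
-- ===== SOURCE A (Python) =====
-- def fun11(n):
--     m = 0
--     i = 0
--     while i < n:
--         j = i
--         while j < n:
--             k = j + 1
--             while k < n:
--                 m += 1
--                 k += 1
--             j += 1
--         i += 1
--     return m
-- ===== SOURCE B (Python) =====
-- def fun11(n):
--     # closed form: number of triples 0 <= i <= j < k < n is C(n+1, 3)
--     if n > 0:
--         return (n - 1) * n * (n + 1) // 6
--     return 0
-- ===== Notes on version B (the rewrite author's own statement) =====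
-- stated objective: faster
-- what changed: Replaced the three nested counting loops by the closed-form binomial formula (n-1)*n*(n+1)//6.
import Mathlib
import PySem

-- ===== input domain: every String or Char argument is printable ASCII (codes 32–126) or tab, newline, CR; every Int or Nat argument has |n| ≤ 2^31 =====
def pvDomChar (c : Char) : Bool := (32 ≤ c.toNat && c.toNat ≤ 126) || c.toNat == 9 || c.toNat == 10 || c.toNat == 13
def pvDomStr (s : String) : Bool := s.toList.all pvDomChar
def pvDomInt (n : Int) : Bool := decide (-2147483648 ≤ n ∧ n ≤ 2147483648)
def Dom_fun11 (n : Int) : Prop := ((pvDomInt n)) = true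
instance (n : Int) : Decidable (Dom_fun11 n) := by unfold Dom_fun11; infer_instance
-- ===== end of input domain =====

-- B replaces A's three nested counting loops by the closed-form formula (n-1)*n*(n+1)//6 (O(1) vs O(n^3)).

-- ===== PORT A =====
-- inner 'while k < n: m += 1; k += 1'
def fun11_loopK (n k m : Int) : Int :=
  if k < n then fun11_loopK n (k + 1) (m + 1) else m
termination_by (n - k).toNat
decreasing_by omega

-- middle 'while j < n: k = j + 1; <loopK>; j += 1'
def fun11_loopJ (n j m : Int) : Int :=
  if j < n then fun11_loopJ n (j + 1) (fun11_loopK n (j + 1) m) else m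
termination_by (n - j).toNat
decreasing_by omega

-- outer 'while i < n: j = i; <loopJ>; i += 1'
def fun11_loopI (n i m : Int) : Int :=
  if i < n then fun11_loopI n (i + 1) (fun11_loopJ n i m) else m
termination_by (n - i).toNat
decreasing_by omega

def fun11 (n : Int) : Int := fun11_loopI n 0 0

-- ===== PORT B =====
def fun11_alt (n : Int) : Int :=
  if n > 0 then PySem.Int.floordiv ((n - 1) * n * (n + 1)) 6 else 0

-- ===== PRECONDITION & SPEC =====
def Spec_fun11 (n : Int) (out : Int) : Prop := out = fun11_alt n
instance (n : Int) (out : Int) : Decidable (Spec_fun11 n out) := by unfold Spec_fun11; infer_instance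

-- ===== CLAIM (what is proved, stated in full; the proofs are below) =====
def Claim_equal_fun11 : Prop := ∀ (n : Int), Dom_fun11 n → Spec_fun11 n (fun11 n)

-- ===== LEMMAS AND PROOFS =====

-- triangular and tetrahedral numbers as structural recursions
def pvTri : Nat → Nat
  | 0 => 0
  | d + 1 => pvTri d + d

def pvTet : Nat → Nat
  | 0 => 0
  | d + 1 => pvTet d + pvTri (d + 1)

theorem loopK_eq (n k m : Int) : fun11_loopK n k m = m + ((n - k).toNat : Int) := by
  fun_induction fun11_loopK n k m with
  | case1 k m h ih => rw [ih]; omega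
  | case2 k m h => omega

theorem loopJ_eq (n j m : Int) : fun11_loopJ n j m = m + (pvTri (n - j).toNat : Int) := by
  fun_induction fun11_loopJ n j m with
  | case1 j m h ih =>
    rw [ih, loopK_eq]
    have hd : (n - j).toNat = (n - (j + 1)).toNat + 1 := by omega
    rw [hd, pvTri]
    push_cast; omega
  | case2 j m h =>
    have hz : (n - j).toNat = 0 := by omega
    simp [hz, pvTri]

theorem loopI_eq (n i m : Int) : fun11_loopI n i m = m + (pvTet (n - i).toNat : Int) := by
  fun_induction fun11_loopI n i m with
  | case1 i m h ih =>
    rw [ih, loopJ_eq]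
    have hd : (n - i).toNat = (n - (i + 1)).toNat + 1 := by omega
    rw [hd, pvTet]
    push_cast; omega
  | case2 i m h =>
    have hz : (n - i).toNat = 0 := by omega
    simp [hz, pvTet]

theorem tri_mul (d : Nat) : 2 * pvTri (d + 1) = (d + 1) * d := by
  induction d with
  | zero => rfl
  | succ e ih => rw [pvTri]; nlinarith [ih]

theorem tet_mul (d : Nat) : 6 * pvTet (d + 1) = d * (d + 1) * (d + 2) := by
  induction d with
  | zero => rfl
  | succ e ih => rw [pvTet]; nlinarith [ih, tri_mul (e + 1)]

theorem fun11_eq_tet (n : Int) : fun11 n = (pvTet n.toNat : Int) := by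
  unfold fun11
  rw [loopI_eq]
  simp

-- ===== VERDICT (by name: the statement is the Claim_ definition above) =====
theorem fun11_spec : Claim_equal_fun11 := by
  intro n _
  unfold Spec_fun11 fun11_alt
  rw [fun11_eq_tet]
  by_cases h : n > 0
  · simp only [h, if_pos]
    obtain ⟨d, hd⟩ : ∃ d, n.toNat = d + 1 := ⟨n.toNat - 1, by omega⟩
    have h6 := tet_mul d
    have h6' : 6 * (pvTet (d + 1) : Int) = (d : Int) * ((d : Int) + 1) * ((d : Int) + 2) := by
      exact_mod_cast congrArg (fun x : Nat => (x : Int)) h6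
    have hdn : (d : Int) = n - 1 := by omega
    have hval : (n - 1) * n * (n + 1) = 6 * (pvTet n.toNat : Int) := by
      rw [hd, h6', hdn]; ring
    rw [hval, PySem.Int.floordiv_eq_ediv_of_pos (by omega)]
    omega
  · simp only [h, if_false]
    have hz : n.toNat = 0 := by omega
    simp [hz, pvTet]
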